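-- pv_equiv track=rewrite | github.com/sofia285/FP | teste.py | reconhece
-- ===== SOURCE A (Python) =====
-- def reconhece(frase):
--     if frase[0] not in 'ABCD':
--         return False
--     i = 1
--     while i <= len(frase) - 1 and frase[i] in '1234':
--         i += 1
--     if i > 1 != len(frase):
--         while i <= len(frase) - 1 and frase[i] in 'ABCD':
--             i += 1
--         return i == len(frase)
--     else:
--         return False
-- ===== SOURCE B (Python) =====
-- def reconhece(frase):
--     # Explicit DFA: 0 start, 1 saw prefix letter, 2 in digit run, 3 in trailing letters, 4 dead.
--     state = 0
--     for c in frase: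
--         if state == 0:
--             state = 1 if c in 'ABCD' else 4
--         elif state == 1:
--             state = 2 if c in '1234' else 4
--         elif state == 2:
--             if c in '1234':
--                 state = 2
--             elif c in 'ABCD':
--                 state = 3
--             else:
--                 state = 4
--         elif state == 3:
--             state = 3 if c in 'ABCD' else 4
--     return state in (2, 3)
-- ===== Notes on version B (the rewrite author's own statement) =====
-- stated objective: alternative
-- what changed: Replaced A's two sequential index-pointer while-loops plus chained-comparison test with a single left-to-right pass driving an explicit 5-state DFA accumulator, accepting iff the final state is 2 or 3.
import Mathlib
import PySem

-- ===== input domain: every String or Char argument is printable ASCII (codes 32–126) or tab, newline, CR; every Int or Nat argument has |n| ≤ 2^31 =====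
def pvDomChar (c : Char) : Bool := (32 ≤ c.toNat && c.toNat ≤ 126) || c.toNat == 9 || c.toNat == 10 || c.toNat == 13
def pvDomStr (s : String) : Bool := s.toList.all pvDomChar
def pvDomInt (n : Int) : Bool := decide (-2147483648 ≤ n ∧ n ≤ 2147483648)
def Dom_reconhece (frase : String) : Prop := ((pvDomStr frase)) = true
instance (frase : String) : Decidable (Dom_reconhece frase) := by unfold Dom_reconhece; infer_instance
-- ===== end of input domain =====

-- B replaces A's two index-pointer while-loops with one left-to-right pass driving an explicit 5-state DFA; same cost, different algorithm.

-- ===== PORT A =====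
-- 'while i <= len(frase)-1 and frase[i] in allowed: i += 1', returning the final i
def reconheceScan (allowed : List Char) (cs : List Char) (i : Nat) : Nat :=
  if h : i < cs.length ∧ cs.getD i ' ' ∈ allowed then
    reconheceScan allowed cs (i + 1)
  else i
termination_by cs.length - i
decreasing_by omega

def reconhece (frase : String) : Bool :=
  match PySem.Str.pyGet? frase 0 with
  | none => false      -- unreachable under Pre_ (Python raises IndexError on "")
  | some c =>
    if c ∉ ['A','B','C','D'] then false
    else
      let cs := frase.toList
      let i := reconheceScan ['1','2','3','4'] cs 1
      -- 'if i > 1 != len(frase)' is chained: (i > 1) and (1 != len(frase))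
      if i > 1 ∧ 1 ≠ cs.length then
        let j := reconheceScan ['A','B','C','D'] cs i
        decide (j = cs.length)
      else false

-- ===== PORT B =====
-- DFA states: 0 start, 1 saw prefix letter, 2 in digit run, 3 in trailing letters, 4 dead
def dfaStep (s : Nat) (c : Char) : Nat :=
  if s = 0 then (if c ∈ ['A','B','C','D'] then 1 else 4)
  else if s = 1 then (if c ∈ ['1','2','3','4'] then 2 else 4)
  else if s = 2 then
    (if c ∈ ['1','2','3','4'] then 2
     else if c ∈ ['A','B','C','D'] then 3 else 4)
  else if s = 3 then (if c ∈ ['A','B','C','D'] then 3 else 4)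
  else 4

def reconhece_alt (frase : String) : Bool :=
  let s := frase.toList.foldl dfaStep 0
  s == 2 || s == 3

-- ===== PRECONDITION & SPEC =====
-- Pre_ excludes exactly the empty string, on which A raises IndexError at frase[0].
def Pre_reconhece (frase : String) : Prop := frase ≠ ""
instance (frase : String) : Decidable (Pre_reconhece frase) := by unfold Pre_reconhece; infer_instance
def pvWitness_reconhece : String := "A12B"

def Spec_reconhece (frase : String) (out : Bool) : Prop := out = reconhece_alt frase
instance (frase : String) (out : Bool) : Decidable (Spec_reconhece frase out) := by unfold Spec_reconhece; infer_instance

-- ===== CLAIM (what is proved, stated in full; the proofs are below) =====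
def Claim_equal_reconhece : Prop := ∀ (frase : String), Dom_reconhece frase → Pre_reconhece frase → Spec_reconhece frase (reconhece frase)

-- ===== LEMMAS AND PROOFS =====

theorem pvLenTakeWhileLe (l : List Char) (p : Char → Bool) : (l.takeWhile p).length ≤ l.length :=
  (List.takeWhile_prefix p).length_le

theorem pvDropWhileEqDrop (l : List Char) (p : Char → Bool) :
    l.dropWhile p = l.drop (l.takeWhile p).length := by
  induction l with
  | nil => simp
  | cons a l ih => by_cases h : p a <;> simp [h, ih]

-- (takeWhile p l).length = l.length ↔ all p
theorem pvTakeWhileFull (l : List Char) (p : Char → Bool) :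
    ((l.takeWhile p).length = l.length) ↔ l.all p = true := by
  constructor
  · intro h
    have heq : l.takeWhile p = l := (List.takeWhile_prefix p).eq_of_length h
    exact List.all_eq_true.mpr fun x hx => List.takeWhile_eq_self_iff.mp heq x hx
  · intro h
    rw [List.takeWhile_eq_self_iff.mpr (fun x hx => List.all_eq_true.mp h x hx)]

-- the scan from index i lands at i plus the length of the matching prefix of (cs.drop i)
theorem reconheceScan_eq (allowed : List Char) (cs : List Char) (i : Nat) (hi : i ≤ cs.length) :
    reconheceScan allowed cs i = i + ((cs.drop i).takeWhile (fun d => d ∈ allowed)).length := by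
  induction hn : cs.length - i generalizing i with
  | zero =>
    have : i = cs.length := by omega
    subst this
    rw [reconheceScan]
    simp
  | succ n ih =>
    have hlt : i < cs.length := by omega
    rw [reconheceScan]
    have hdrop : cs.drop i = cs[i] :: cs.drop (i + 1) := by
      rw [List.drop_eq_getElem_cons hlt]
    by_cases hmem : cs[i] ∈ allowed
    · have hcond : i < cs.length ∧ cs.getD i ' ' ∈ allowed := by
        refine ⟨hlt, ?_⟩
        simpa [List.getD, List.getElem?_eq_getElem hlt] using hmem
      rw [dif_pos hcond, ih (i + 1) (by omega) (by omega), hdrop]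
      simp [List.takeWhile, hmem]
      omega
    · have hcond : ¬ (i < cs.length ∧ cs.getD i ' ' ∈ allowed) := by
        intro ⟨_, h2⟩
        apply hmem
        simpa [List.getD, List.getElem?_eq_getElem hlt] using h2
      rw [dif_neg hcond, hdrop]
      simp [List.takeWhile, hmem]

-- DFA characterizations
theorem dfa4 (l : List Char) : l.foldl dfaStep 4 = 4 := by
  induction l with
  | nil => rfl
  | cons a l ih => simpa [dfaStep] using ih

theorem dfa3 (l : List Char) :
    l.foldl dfaStep 3 = if l.all (fun d => d ∈ ['A','B','C','D']) then 3 else 4 := by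
  induction l with
  | nil => rfl
  | cons a l ih =>
    by_cases ha : a ∈ ['A','B','C','D']
    · have haT : (decide (a ∈ ['A','B','C','D']) : Bool) = true := by simpa using ha
      rw [List.foldl_cons, show dfaStep 3 a = 3 by simp [dfaStep, ha], ih,
        List.all_cons, haT, Bool.true_and]
    · have haF : (decide (a ∈ ['A','B','C','D']) : Bool) = false := by simpa using ha
      rw [List.foldl_cons, show dfaStep 3 a = 4 by simp [dfaStep, ha], dfa4,
        List.all_cons, haF, Bool.false_and, if_neg (by simp)]

theorem dfa2 (l : List Char) :
    l.foldl dfaStep 2 =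
      (if l.dropWhile (fun d => d ∈ ['1','2','3','4']) = [] then 2
       else if (l.dropWhile (fun d => d ∈ ['1','2','3','4'])).all (fun d => d ∈ ['A','B','C','D']) then 3
       else 4) := by
  induction l with
  | nil => rfl
  | cons a l ih =>
    by_cases hd : a ∈ ['1','2','3','4']
    · have hdT : (decide (a ∈ ['1','2','3','4']) : Bool) = true := by simpa using hd
      rw [List.foldl_cons, show dfaStep 2 a = 2 by simp [dfaStep, hd], ih]
      simp only [List.dropWhile_cons, hdT, if_true]
    · have hdF : (decide (a ∈ ['1','2','3','4']) : Bool) = false := by simpa using hd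
      by_cases ha : a ∈ ['A','B','C','D']
      · have haT : (decide (a ∈ ['A','B','C','D']) : Bool) = true := by simpa using ha
        rw [List.foldl_cons, show dfaStep 2 a = 3 by simp [dfaStep, hd, ha], dfa3]
        simp only [List.dropWhile_cons, hdF, if_false, Bool.false_eq_true]
        rw [if_neg (List.cons_ne_nil a l), List.all_cons, haT, Bool.true_and]
      · have haF : (decide (a ∈ ['A','B','C','D']) : Bool) = false := by simpa using ha
        rw [List.foldl_cons, show dfaStep 2 a = 4 by simp [dfaStep, hd, ha], dfa4]
        simp only [List.dropWhile_cons, hdF, if_false, Bool.false_eq_true]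
        rw [if_neg (List.cons_ne_nil a l), List.all_cons, haF, Bool.false_and, if_neg (by simp)]

theorem reconhece_spec : Claim_equal_reconhece := by
  intro frase _ hpre
  unfold Spec_reconhece reconhece reconhece_alt
  have hne : frase.toList ≠ [] := by simpa using hpre
  obtain ⟨c, rest, hcs⟩ := List.exists_cons_of_ne_nil hne
  have hget : PySem.Str.pyGet? frase 0 = some c := by
    simp [PySem.Str.pyGet?, PySem.List.pyGet?, PySem.List.pyIdx?, hcs]
  rw [hget, hcs]
  by_cases hc : c ∈ ['A','B','C','D']
  · simp only [if_neg (not_not_intro hc)]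
    rw [List.foldl_cons, show dfaStep 0 c = 1 by simp [dfaStep, hc]]
    cases rest with
    | nil =>
      have h1 : reconheceScan ['1','2','3','4'] [c] 1 = 1 := by
        rw [reconheceScan_eq _ _ 1 (by simp)]; simp
      rw [h1, if_neg (by simp)]
      rfl
    | cons r rs =>
      by_cases hr : r ∈ ['1','2','3','4']
      · -- digit run begins
        have hrT : (decide (r ∈ ['1','2','3','4']) : Bool) = true := by simpa using hr
        rw [List.foldl_cons, show dfaStep 1 r = 2 by simp [dfaStep, hr], dfa2]
        set t := (rs.takeWhile (fun d => d ∈ ['1','2','3','4'])).length with ht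
        have htle : t ≤ rs.length := pvLenTakeWhileLe _ _
        have hscan1 : reconheceScan ['1','2','3','4'] (c :: r :: rs) 1 = 2 + t := by
          rw [reconheceScan_eq _ _ 1 (by simp)]
          rw [show (c :: r :: rs).drop 1 = r :: rs from rfl]
          simp only [List.takeWhile_cons, hrT, if_true, List.length_cons, ← ht]
          omega
        set after := rs.dropWhile (fun d => d ∈ ['1','2','3','4']) with hafter
        have hafterdrop : after = rs.drop t := by rw [hafter, ht, pvDropWhileEqDrop]
        have hafterlen : after.length = rs.length - t := by rw [hafterdrop]; simp
        have hdrop2 : (c :: r :: rs).drop (2 + t) = after := by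
          rw [hafterdrop, show 2 + t = t + 1 + 1 by omega]
          simp [List.drop_succ_cons]
        have hscan2 : reconheceScan ['A','B','C','D'] (c :: r :: rs) (2 + t) =
            2 + t + (after.takeWhile (fun d => d ∈ ['A','B','C','D'])).length := by
          rw [reconheceScan_eq _ _ _ (by simp; omega), hdrop2]
        set k := (after.takeWhile (fun d => d ∈ ['A','B','C','D'])).length with hk
        have hkle : k ≤ after.length := pvLenTakeWhileLe _ _
        rw [hscan1, if_pos ⟨by omega, by simp only [List.length_cons]; omega⟩, hscan2]
        by_cases hemp : after = []
        · rw [if_pos hemp]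
          have hteq : t = rs.length := by
            have h2 := hafterlen; rw [hemp] at h2; simp at h2; omega
          have hk0 : k = 0 := by rw [hk, hemp]; simp
          have hlen2 : 2 + t + k = (c :: r :: rs).length := by
            simp only [List.length_cons]; omega
          rw [decide_eq_true hlen2]
          rfl
        · rw [if_neg hemp]
          rcases Bool.eq_false_or_eq_true (after.all (fun d => d ∈ ['A','B','C','D'])) with hb | hb
          · rw [hb]
            have hkeq : k = after.length := by
              rw [hk]; exact (pvTakeWhileFull after (fun d => d ∈ ['A','B','C','D'])).mpr hb
            rw [decide_eq_true (by simp only [List.length_cons]; omega)]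
            simp
          · rw [hb]
            have hkne : k < after.length := by
              by_contra h
              have hkeq : (after.takeWhile (fun d => d ∈ ['A','B','C','D'])).length = after.length := by
                omega
              rw [(pvTakeWhileFull after (fun d => d ∈ ['A','B','C','D'])).mp hkeq] at hb
              exact absurd hb (by simp)
            rw [decide_eq_false (by simp only [List.length_cons]; omega)]
            simp
      · -- no digit after the prefix letter: both reject
        have hrF : (decide (r ∈ ['1','2','3','4']) : Bool) = false := by simpa using hr
        have hscan1 : reconheceScan ['1','2','3','4'] (c :: r :: rs) 1 = 1 := by
          rw [reconheceScan_eq _ _ 1 (by simp)]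
          rw [show (c :: r :: rs).drop 1 = r :: rs from rfl]
          simp only [List.takeWhile_cons, hrF, if_false, Bool.false_eq_true, List.length_nil]
        rw [hscan1, if_neg (by omega),
          List.foldl_cons, show dfaStep 1 r = 4 by simp [dfaStep, hr], dfa4]
        rfl
  · simp only [if_pos hc]
    rw [List.foldl_cons, show dfaStep 0 c = 4 by simp [dfaStep, hc], dfa4]
    rfl
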